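-- pv_equiv track=rewrite | github.com/mxmssh/manul | manul_utils.py | locate_diffs
-- ===== SOURCE A (Python) =====
-- def locate_diffs(data1, data2, length):
--     f_loc = -1
--     l_loc = -1
--     for i in range(0, length):
--         if data1[i] != data2[i]:
--             if f_loc == -1: f_loc = i
--             l_loc = i
--     return f_loc, l_loc
-- ===== SOURCE B (Python) =====
-- def locate_diffs(data1, data2, length):
--     f_loc = -1
--     for i in range(0, length):
--         if data1[i] != data2[i]:
--             f_loc = i
--             break
--     l_loc = -1
--     for i in range(length - 1, -1, -1):
--         if data1[i] != data2[i]: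
--             l_loc = i
--             break
--     return f_loc, l_loc
-- ===== Notes on version B (the rewrite author's own statement) =====
-- stated objective: alternative
-- what changed: Replaces A's single full forward sweep maintaining both first and last indices with two independent early-exit scans: one forward for the first difference, one backward for the last.
import Mathlib
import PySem

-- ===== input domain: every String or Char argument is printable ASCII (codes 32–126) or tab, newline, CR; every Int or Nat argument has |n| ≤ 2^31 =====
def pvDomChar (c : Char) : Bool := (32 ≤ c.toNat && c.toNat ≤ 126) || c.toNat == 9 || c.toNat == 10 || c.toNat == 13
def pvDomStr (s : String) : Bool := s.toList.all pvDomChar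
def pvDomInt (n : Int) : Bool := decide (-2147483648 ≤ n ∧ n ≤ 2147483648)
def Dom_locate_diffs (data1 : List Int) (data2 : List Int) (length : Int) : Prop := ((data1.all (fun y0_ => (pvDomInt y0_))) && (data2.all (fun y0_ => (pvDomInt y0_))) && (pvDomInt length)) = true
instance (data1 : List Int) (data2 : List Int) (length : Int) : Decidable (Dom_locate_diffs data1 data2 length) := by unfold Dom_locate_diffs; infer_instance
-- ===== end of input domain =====

-- B replaces A's single full forward sweep (tracking first and last difference together)
-- by two independent early-exit scans, one from each end; same return value on Pre_.

-- ===== PORT A =====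
-- single forward loop maintaining (f_loc, l_loc); list indexing via pyGetD (index is
-- always in range under Pre_, so the default 0 is never the value used)
def locate_diffs (data1 : List Int) (data2 : List Int) (length : Int) : Int × Int :=
  (PySem.List.pyRange 0 length 1).foldl
    (fun (st : Int × Int) i =>
      if PySem.List.pyGetD data1 i 0 ≠ PySem.List.pyGetD data2 i 0 then
        (if st.1 = -1 then (i, i) else (st.1, i))
      else st)
    (-1, -1)

-- ===== PORT B =====
-- the early-exit loop 'for i in ...: if diff: result = i; break' as structural recursion
def scanDiff (d1 d2 : List Int) : List Int → Int
  | [] => -1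
  | i :: rest =>
      if PySem.List.pyGetD d1 i 0 ≠ PySem.List.pyGetD d2 i 0 then i else scanDiff d1 d2 rest

def locate_diffs_alt (data1 : List Int) (data2 : List Int) (length : Int) : Int × Int :=
  (scanDiff data1 data2 (PySem.List.pyRange 0 length 1),
   scanDiff data1 data2 (PySem.List.pyRange (length - 1) (-1) (-1)))

-- ===== PRECONDITION & SPEC =====
-- A indexes data1[i]/data2[i] for every 0 ≤ i < length, so it raises IndexError exactly
-- when length exceeds either list's length.
def Pre_locate_diffs (data1 : List Int) (data2 : List Int) (length : Int) : Prop :=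
  length ≤ data1.length ∧ length ≤ data2.length
instance (data1 : List Int) (data2 : List Int) (length : Int) : Decidable (Pre_locate_diffs data1 data2 length) := by unfold Pre_locate_diffs; infer_instance
def pvWitness_locate_diffs : List Int × List Int × Int := ([1, 2, 3], [1, 5, 3], 3)

def Spec_locate_diffs (data1 : List Int) (data2 : List Int) (length : Int) (out : Int × Int) : Prop := out = locate_diffs_alt data1 data2 length
instance (data1 : List Int) (data2 : List Int) (length : Int) (out : Int × Int) : Decidable (Spec_locate_diffs data1 data2 length out) := by unfold Spec_locate_diffs; infer_instance

-- ===== CLAIM (what is proved, stated in full; the proofs are below) =====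
def Claim_equal_locate_diffs : Prop := ∀ (data1 : List Int) (data2 : List Int) (length : Int), Dom_locate_diffs data1 data2 length → Pre_locate_diffs data1 data2 length → Spec_locate_diffs data1 data2 length (locate_diffs data1 data2 length)

-- ===== LEMMAS AND PROOFS =====

-- proof-only helper: "some index in l has differing entries"
abbrev hasDiff (d1 d2 : List Int) (l : List Int) : Prop :=
  ∃ x ∈ l, PySem.List.pyGetD d1 x 0 ≠ PySem.List.pyGetD d2 x 0

theorem hasDiff_reverse (d1 d2 l : List Int) :
    hasDiff d1 d2 l.reverse ↔ hasDiff d1 d2 l := by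
  simp only [hasDiff, List.mem_reverse]

theorem scanDiff_append (d1 d2 l1 l2 : List Int) :
    scanDiff d1 d2 (l1 ++ l2) =
      if hasDiff d1 d2 l1 then scanDiff d1 d2 l1 else scanDiff d1 d2 l2 := by
  induction l1 with
  | nil =>
      rw [List.nil_append, if_neg]
      rintro ⟨x, hx, -⟩; exact absurd hx (List.not_mem_nil)
  | cons i rest ih =>
      rw [List.cons_append]
      by_cases h : PySem.List.pyGetD d1 i 0 ≠ PySem.List.pyGetD d2 i 0
      · have hex : hasDiff d1 d2 (i :: rest) := ⟨i, List.mem_cons_self, h⟩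
        simp only [scanDiff, if_pos h, if_pos hex]
      · simp only [scanDiff, if_neg h]
        rw [ih]
        by_cases h2 : hasDiff d1 d2 rest
        · rw [if_pos h2, if_pos ⟨h2.choose, List.mem_cons_of_mem i h2.choose_spec.1, h2.choose_spec.2⟩]
        · rw [if_neg h2, if_neg]
          rintro ⟨x, hx, hdx⟩
          rcases List.mem_cons.mp hx with rfl | hx'
          · exact h hdx
          · exact h2 ⟨x, hx', hdx⟩

theorem scanDiff_eq_neg_one (d1 d2 l : List Int) (h : ¬ hasDiff d1 d2 l) :
    scanDiff d1 d2 l = -1 := by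
  induction l with
  | nil => rfl
  | cons i rest ih =>
      have hi : ¬ PySem.List.pyGetD d1 i 0 ≠ PySem.List.pyGetD d2 i 0 :=
        fun hd => h ⟨i, List.mem_cons_self, hd⟩
      rw [scanDiff, if_neg hi]
      exact ih (fun ⟨x, hx, hdx⟩ => h ⟨x, List.mem_cons_of_mem i hx, hdx⟩)

theorem foldl_loc (d1 d2 : List Int) (l : List Int) (a b : Int)
    (hnn : ∀ i ∈ l, (0:Int) ≤ i) :
    l.foldl
      (fun (st : Int × Int) i =>
        if PySem.List.pyGetD d1 i 0 ≠ PySem.List.pyGetD d2 i 0 then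
          (if st.1 = -1 then (i, i) else (st.1, i))
        else st) (a, b)
    = ((if a = -1 then scanDiff d1 d2 l else a),
       (if hasDiff d1 d2 l then scanDiff d1 d2 l.reverse else b)) := by
  induction l generalizing a b with
  | nil =>
      have hno : ¬ hasDiff d1 d2 ([] : List Int) := by
        rintro ⟨x, hx, -⟩; exact absurd hx List.not_mem_nil
      rw [List.foldl_nil, if_neg hno]
      by_cases ha : a = -1
      · rw [if_pos ha, ha]; rfl
      · rw [if_neg ha]
  | cons i rest ih =>
      have hi0 : (0:Int) ≤ i := hnn i List.mem_cons_self
      have hrest : ∀ j ∈ rest, (0:Int) ≤ j := fun j hj => hnn j (List.mem_cons_of_mem i hj)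
      have hne : i ≠ -1 := by omega
      rw [List.foldl_cons]
      by_cases hd : PySem.List.pyGetD d1 i 0 ≠ PySem.List.pyGetD d2 i 0
      · have hscan : scanDiff d1 d2 (i :: rest) = i := by
          simp only [scanDiff, if_pos hd]
        have hex : hasDiff d1 d2 (i :: rest) := ⟨i, List.mem_cons_self, hd⟩
        have hrev : scanDiff d1 d2 ((i :: rest).reverse)
            = if hasDiff d1 d2 rest then scanDiff d1 d2 rest.reverse else i := by
          rw [List.reverse_cons, scanDiff_append]
          simp only [hasDiff_reverse]
          by_cases h2 : hasDiff d1 d2 rest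
          · rw [if_pos h2, if_pos h2]
          · rw [if_neg h2, if_neg h2]
            simp only [scanDiff, if_pos hd]
        by_cases ha : a = -1
        · rw [if_pos hd, if_pos (show (a, b).1 = -1 from ha), ih i i hrest,
              if_neg hne, if_pos ha, hscan, hrev, if_pos hex]
        · rw [if_pos hd, if_neg (show ¬ (a, b).1 = -1 from ha), ih a i hrest]
          simp only [if_neg ha]
          rw [hrev, if_pos hex]
      · rw [if_neg hd, ih a b hrest]
        have hscan : scanDiff d1 d2 (i :: rest) = scanDiff d1 d2 rest := by
          simp only [scanDiff, if_neg hd]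
        have hiff : hasDiff d1 d2 (i :: rest) ↔ hasDiff d1 d2 rest := by
          constructor
          · rintro ⟨x, hx, hdx⟩
            rcases List.mem_cons.mp hx with rfl | hx'
            · exact absurd hdx hd
            · exact ⟨x, hx', hdx⟩
          · rintro ⟨x, hx, hdx⟩; exact ⟨x, List.mem_cons_of_mem i hx, hdx⟩
        have hrev : scanDiff d1 d2 ((i :: rest).reverse)
            = if hasDiff d1 d2 rest then scanDiff d1 d2 rest.reverse else -1 := by
          rw [List.reverse_cons, scanDiff_append]
          simp only [hasDiff_reverse]
          by_cases h2 : hasDiff d1 d2 rest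
          · rw [if_pos h2, if_pos h2]
          · rw [if_neg h2, if_neg h2]
            simp only [scanDiff, if_neg hd]
        rw [hscan, hrev]
        by_cases h2 : hasDiff d1 d2 rest
        · simp only [if_pos h2, if_pos (hiff.mpr h2)]
        · simp only [if_neg h2, if_neg (fun h => h2 (hiff.mp h))]

-- ===== VERDICT (by name: the statement is the Claim_ definition above) =====
theorem locate_diffs_spec : Claim_equal_locate_diffs := by
  intro d1 d2 len _ _
  unfold Spec_locate_diffs locate_diffs locate_diffs_alt
  have hnn : ∀ i ∈ PySem.List.pyRange 0 len 1, (0:Int) ≤ i := by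
    intro i hi
    exact (PySem.List.mem_pyRange_one.mp hi).1
  rw [foldl_loc d1 d2 _ (-1) (-1) hnn]
  have hrev : PySem.List.pyRange (len - 1) (-1) (-1) = (PySem.List.pyRange 0 len 1).reverse := by
    have h := PySem.List.pyRange_neg_one_eq_reverse (len - 1) (-1)
    norm_num at h
    exact h
  rw [hrev, if_pos rfl]
  by_cases hH : hasDiff d1 d2 (PySem.List.pyRange 0 len 1)
  · rw [if_pos hH]
  · rw [if_neg hH,
        scanDiff_eq_neg_one d1 d2 _ (fun h => hH ((hasDiff_reverse d1 d2 _).mp h))]
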